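-- pv_equiv track=rewrite | github.com/iankamin/MIPS-Autograder | grader/autograder.py | getStudentPromptAndOutputPerTest
-- ===== SOURCE A (Python) =====
-- def getStudentPromptAndOutputPerTest(output,testNum):
-- # Split and clean MIPS results
--     try: StudentPrompt=output[testNum*3].strip()
--     except: StudentPrompt = "<NO PROMPT FOUND>"
--     try: StudentOutput=output[(testNum*3)+1]
--     except: StudentOutput = "<NO OUTPUT FOUND>"
--
--     StudentPrompt=StudentPrompt.replace('\n','\n   ')
--     while '\n\n' in StudentOutput: StudentOutput = StudentOutput.replace('\n\n','\n')
--     StudentOutput = [r.strip() for r in StudentOutput.split('\n')]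
--     return StudentOutput,StudentPrompt
-- ===== SOURCE B (Python) =====
-- def getStudentPromptAndOutputPerTest(output, testNum):
--     # Same result as the original; blank-line collapsing done in one forward pass
--     # over the characters instead of a repeated-replace fixpoint loop.
--     i = testNum * 3
--     n = len(output)
--     StudentPrompt = output[i].strip() if -n <= i < n else "<NO PROMPT FOUND>"
--     raw = output[i + 1] if -n <= i + 1 < n else "<NO OUTPUT FOUND>"
--
--     StudentPrompt = StudentPrompt.replace('\n', '\n   ')
--
--     buf = []
--     for c in raw:
--         if c == '\n' and buf and buf[-1] == '\n':
--             continue  # skip every newline that directly follows one already kept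
--         buf.append(c)
--     StudentOutput = [r.strip() for r in ''.join(buf).split('\n')]
--     return StudentOutput, StudentPrompt
-- ===== Notes on version B (the rewrite author's own statement) =====
-- stated objective: alternative
-- what changed: The repeated whole-string replace('\n\n','\n') fixpoint loop is replaced by a single forward pass over the characters that skips any newline directly following a kept newline; indexing uses explicit bounds checks instead of try/except.
import Mathlib
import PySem

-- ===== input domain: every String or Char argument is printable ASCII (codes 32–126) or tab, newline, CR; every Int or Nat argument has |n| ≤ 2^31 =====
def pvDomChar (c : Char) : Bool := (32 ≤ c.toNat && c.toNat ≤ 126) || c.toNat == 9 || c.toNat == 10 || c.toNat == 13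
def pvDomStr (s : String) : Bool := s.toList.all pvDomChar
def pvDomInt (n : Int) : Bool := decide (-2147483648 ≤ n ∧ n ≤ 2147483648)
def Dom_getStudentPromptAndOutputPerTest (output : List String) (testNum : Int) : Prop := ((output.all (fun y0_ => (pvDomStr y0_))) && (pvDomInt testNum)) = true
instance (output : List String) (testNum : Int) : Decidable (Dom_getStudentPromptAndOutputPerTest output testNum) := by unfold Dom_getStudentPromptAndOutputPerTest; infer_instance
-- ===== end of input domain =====

-- B collapses runs of newlines in one forward pass over the characters instead of A's
-- repeated-`replace('\n\n','\n')` fixpoint loop — an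
-- alternative decomposition of the same job; return values are proved identical on the whole domain.

-- ===== PORT A =====

-- one left-to-right pass of `s.replace('\n\n', '\n')` (needed to prove the while loop terminates)
def pvR : List Char → List Char
  | [] => []
  | c :: t =>
    if c = '\n' ∧ t.head? = some '\n' then '\n' :: pvR t.tail
    else c :: pvR t
termination_by l => l.length
decreasing_by
  all_goals simp [List.length_tail]

theorem pv_go_eq : ∀ (fuel : Nat) (l acc : List Char), l.length ≤ fuel →
    PySem.Chars.replace.go ['\n','\n'] ['\n'] fuel l acc = acc.reverse ++ pvR l := by
  intro fuel
  induction fuel with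
  | zero =>
    intro l acc h
    cases l with
    | nil => simp [PySem.Chars.replace.go, pvR]
    | cons c t => simp at h
  | succ f ih =>
    intro l acc h
    cases l with
    | nil => simp [PySem.Chars.replace.go, pvR]
    | cons c t =>
      rw [PySem.Chars.replace.go]
      by_cases hp : c = '\n' ∧ t.head? = some '\n'
      · obtain ⟨hc, ht⟩ := hp
        cases t with
        | nil => simp at ht
        | cons d t' =>
          simp only [List.head?_cons, Option.some.injEq] at ht
          subst hc; subst ht
          have hpre : List.isPrefixOf ['\n','\n'] ('\n'::'\n'::t') = true := by
            simp [List.isPrefixOf]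
          rw [if_pos hpre]
          have := ih t' (['\n'].reverse ++ acc) (by simp at h ⊢; omega)
          simp only [List.drop_succ_cons, List.length_nil, List.drop_zero, List.length_cons] at this ⊢
          rw [this]
          rw [pvR]
          simp
      · have hpre : ¬ (List.isPrefixOf ['\n','\n'] (c::t) = true) := by
          rw [List.isPrefixOf_iff_prefix]
          rintro ⟨s, hs⟩
          injection hs with h1 h2
          exact hp ⟨h1.symm, by rw [← h2]; simp⟩
        rw [if_neg hpre]
        have := ih t (c :: acc) (by simp at h ⊢; omega)
        rw [this, pvR, if_neg hp]
        simp

theorem pvReplace_toList (s : String) :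
    (PySem.Str.replace s "\n\n" "\n").toList = pvR s.toList := by
  rw [PySem.Str.toList_replace]
  have h2 : ("\n\n" : String).toList = ['\n','\n'] := by decide
  have h1 : ("\n" : String).toList = ['\n'] := by decide
  rw [h2, h1, PySem.Chars.replace]
  simp only [List.isEmpty_cons, if_false, Bool.false_eq_true]
  exact pv_go_eq _ _ [] le_rfl

theorem pvR_length_le (l : List Char) : (pvR l).length ≤ l.length := by
  induction l using pvR.induct with
  | case1 => simp [pvR]
  | case2 c t h ih =>
    rw [pvR, if_pos h]
    have : t.tail.length ≤ t.length := by simp [List.length_tail]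
    simpa using by omega
  | case3 c t h ih =>
    rw [pvR, if_neg h]
    simpa using ih

theorem pvR_length_lt (l : List Char) (h : ['\n','\n'] <:+: l) :
    (pvR l).length < l.length := by
  induction l using pvR.induct with
  | case1 => simp at h
  | case2 c t hc ih =>
    rw [pvR, if_pos hc]
    have := pvR_length_le t.tail
    obtain ⟨_, ht⟩ := hc
    cases t with
    | nil => simp at ht
    | cons d t' => simp at this ⊢; omega
  | case3 c t hc ih =>
    rw [pvR, if_neg hc]
    have ht : ['\n','\n'] <:+: t := by
      rcases h with ⟨pre, suf, hps⟩
      cases pre with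
      | nil =>
        simp at hps
        exact absurd ⟨hps.1.symm, by rw [← hps.2]; simp⟩ hc
      | cons x pre' =>
        exact ⟨pre', suf, by simpa using congrArg List.tail hps⟩
    simpa using ih ht

theorem pvReplace_lt (s : String) (h : PySem.Str.isIn "\n\n" s = true) :
    (PySem.Str.replace s "\n\n" "\n").toList.length < s.toList.length := by
  rw [pvReplace_toList]
  apply pvR_length_lt
  have h' := (PySem.Str.isIn_iff_infix "\n\n" s).mp h
  have h2 : ("\n\n" : String).toList = ['\n','\n'] := by decide
  rwa [h2] at h'

-- `while '\n\n' in StudentOutput: StudentOutput = StudentOutput.replace('\n\n','\n')`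
def pvLoopA (s : String) : String :=
  if h : PySem.Str.isIn "\n\n" s = true then
    pvLoopA (PySem.Str.replace s "\n\n" "\n")
  else s
termination_by s.toList.length
decreasing_by exact pvReplace_lt s h

def getStudentPromptAndOutputPerTest (output : List String) (testNum : Int) : List String × String :=
  -- try/except IndexError around each access (bare except; only indexing can raise here)
  let studentPrompt :=
    match PySem.List.pyGet? output (testNum * 3) with
    | some s => PySem.Str.strip s
    | none => "<NO PROMPT FOUND>"
  let studentOutput0 :=
    match PySem.List.pyGet? output (testNum * 3 + 1) with
    | some s => s
    | none => "<NO OUTPUT FOUND>"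
  let studentPrompt := PySem.Str.replace studentPrompt "\n" "\n   "
  let studentOutput1 := pvLoopA studentOutput0
  let studentOutput :=
    match PySem.Str.split? studentOutput1 "\n" with  -- sep "\n" ≠ "", so always `some`
    | some parts => parts.map PySem.Str.strip
    | none => []
  (studentOutput, studentPrompt)

-- ===== PORT B =====

def getStudentPromptAndOutputPerTest_alt (output : List String) (testNum : Int) : List String × String :=
  let i := testNum * 3
  let n : Int := output.length
  -- explicit bounds checks instead of try/except; the pyGetD default is never used (index checked in range)
  let studentPrompt :=
    if -n ≤ i ∧ i < n then PySem.Str.strip (PySem.List.pyGetD output i "<NO PROMPT FOUND>")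
    else "<NO PROMPT FOUND>"
  let raw :=
    if -n ≤ i + 1 ∧ i + 1 < n then PySem.List.pyGetD output (i + 1) "<NO OUTPUT FOUND>"
    else "<NO OUTPUT FOUND>"
  let studentPrompt := PySem.Str.replace studentPrompt "\n" "\n   "
  -- one pass: keep a char unless it is a '\n' directly following a kept '\n'
  let buf := raw.toList.foldl
    (fun buf c => if c == '\n' && !buf.isEmpty && (buf.getLast? == some '\n') then buf else buf ++ [c])
    ([] : List Char)
  let studentOutput :=
    match PySem.Str.split? (String.ofList buf) "\n" with  -- sep "\n" ≠ "", so always `some`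
    | some parts => parts.map PySem.Str.strip
    | none => []
  (studentOutput, studentPrompt)

-- ===== PRECONDITION & SPEC =====
def Spec_getStudentPromptAndOutputPerTest (output : List String) (testNum : Int) (out : List String × String) : Prop := out = getStudentPromptAndOutputPerTest_alt output testNum
instance (output : List String) (testNum : Int) (out : List String × String) : Decidable (Spec_getStudentPromptAndOutputPerTest output testNum out) := by unfold Spec_getStudentPromptAndOutputPerTest; infer_instance

-- ===== CLAIM (what is proved, stated in full; the proofs are below) =====
def Claim_equal_getStudentPromptAndOutputPerTest : Prop := ∀ (output : List String) (testNum : Int), Dom_getStudentPromptAndOutputPerTest output testNum → Spec_getStudentPromptAndOutputPerTest output testNum (getStudentPromptAndOutputPerTest output testNum)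

-- ===== LEMMAS AND PROOFS =====

-- canonical "collapse every run of '\n' to a single '\n'"
def pvCollapse : List Char → List Char
  | [] => []
  | c :: t =>
    if c = '\n' ∧ t.head? = some '\n' then pvCollapse t
    else c :: pvCollapse t
termination_by l => l.length
decreasing_by
  · simp
  · simp

-- B's pass, parameterised by the previously kept character
def pvColF : Option Char → List Char → List Char
  | _, [] => []
  | p, c :: t => if c = '\n' ∧ p = some '\n' then pvColF p t else c :: pvColF (some c) t

theorem pv_idx_match_eq {β : Type} (xs : List String) (i : Int) (d : β) (d' : String)
    (f : String → β) :
    (match PySem.List.pyGet? xs i with | some v => f v | none => d) =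
      (if -(xs.length : Int) ≤ i ∧ i < (xs.length : Int) then f (PySem.List.pyGetD xs i d') else d) := by
  by_cases hr : PySem.Raise.InRange xs.length i
  · have hif : -(xs.length : Int) ≤ i ∧ i < (xs.length : Int) := hr
    rw [if_pos hif]
    cases h : PySem.List.pyGet? xs i with
    | none => exact absurd hr ((PySem.List.pyGet?_eq_none_iff xs i).mp h)
    | some v => simp [PySem.List.pyGetD, h]
  · have hif : ¬ (-(xs.length : Int) ≤ i ∧ i < (xs.length : Int)) := hr
    rw [if_neg hif, (PySem.List.pyGet?_eq_none_iff xs i).mpr hr]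

theorem pvCollapse_nl_nl (t : List Char) :
    pvCollapse ('\n' :: '\n' :: t) = pvCollapse ('\n' :: t) := by
  rw [pvCollapse, if_pos ⟨rfl, by simp⟩]

theorem pvCollapse_cons_ne (c : Char) (t : List Char) (h : ¬ (c = '\n' ∧ t.head? = some '\n')) :
    pvCollapse (c :: t) = c :: pvCollapse t := by
  rw [pvCollapse, if_neg h]

theorem pv_collapse_pvR (l : List Char) :
    pvCollapse (pvR l) = pvCollapse l ∧
      pvCollapse ('\n' :: pvR l) = pvCollapse ('\n' :: l) := by
  induction l using pvR.induct with
  | case1 => simp [pvR]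
  | case2 c t hc ih =>
    obtain ⟨hc1, hc2⟩ := hc
    subst hc1
    cases t with
    | nil => simp at hc2
    | cons d t' =>
      simp only [List.head?_cons, Option.some.injEq] at hc2
      subst hc2
      simp only [List.tail_cons] at ih
      rw [pvR, if_pos ⟨rfl, by simp⟩]
      simp only [List.tail_cons]
      refine ⟨?_, ?_⟩
      · calc pvCollapse ('\n' :: pvR t') = pvCollapse ('\n' :: t') := ih.2
          _ = pvCollapse ('\n' :: '\n' :: t') := (pvCollapse_nl_nl t').symm
      · calc pvCollapse ('\n' :: '\n' :: pvR t')
            = pvCollapse ('\n' :: pvR t') := pvCollapse_nl_nl _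
          _ = pvCollapse ('\n' :: t') := ih.2
          _ = pvCollapse ('\n' :: '\n' :: t') := (pvCollapse_nl_nl t').symm
          _ = pvCollapse ('\n' :: '\n' :: '\n' :: t') := (pvCollapse_nl_nl _).symm
  | case3 c t hc ih =>
    rw [pvR, if_neg hc]
    by_cases hcn : c = '\n'
    · subst hcn
      refine ⟨ih.2, ?_⟩
      calc pvCollapse ('\n' :: '\n' :: pvR t)
          = pvCollapse ('\n' :: pvR t) := pvCollapse_nl_nl _
        _ = pvCollapse ('\n' :: t) := ih.2
        _ = pvCollapse ('\n' :: '\n' :: t) := (pvCollapse_nl_nl t).symm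
    · have hA : ¬ (c = '\n' ∧ (pvR t).head? = some '\n') := fun h => hcn h.1
      have hB : ¬ (c = '\n' ∧ t.head? = some '\n') := fun h => hcn h.1
      have hC : ¬ (('\n':Char) = '\n' ∧ (c :: pvR t).head? = some '\n') := by
        rintro ⟨-, h⟩; simp at h; exact hcn h
      have hD : ¬ (('\n':Char) = '\n' ∧ (c :: t).head? = some '\n') := by
        rintro ⟨-, h⟩; simp at h; exact hcn h
      refine ⟨?_, ?_⟩
      · rw [pvCollapse_cons_ne c _ hA, pvCollapse_cons_ne c _ hB, ih.1]
      · rw [pvCollapse_cons_ne '\n' _ hC, pvCollapse_cons_ne '\n' _ hD,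
            pvCollapse_cons_ne c _ hA, pvCollapse_cons_ne c _ hB, ih.1]

theorem pv_collapse_of_not_infix (l : List Char) (h : ¬ ['\n','\n'] <:+: l) :
    pvCollapse l = l := by
  induction l with
  | nil => simp [pvCollapse]
  | cons c t ih =>
    have hcase : ¬ (c = '\n' ∧ t.head? = some '\n') := by
      rintro ⟨rfl, ht⟩
      cases t with
      | nil => simp at ht
      | cons d t' =>
        simp only [List.head?_cons, Option.some.injEq] at ht
        subst ht
        exact h ⟨[], t', by simp⟩
    rw [pvCollapse_cons_ne c t hcase, ih (fun hi => h (hi.trans (List.suffix_cons c t).isInfix))]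

theorem pv_loopA_toList (s : String) : (pvLoopA s).toList = pvCollapse s.toList := by
  generalize hm : s.toList.length = m
  induction m using Nat.strong_induction_on generalizing s with
  | _ m ih =>
    rw [pvLoopA]
    by_cases h : PySem.Str.isIn "\n\n" s = true
    · rw [dif_pos h]
      have hlt := pvReplace_lt s h
      subst hm
      rw [ih _ (by omega) _ rfl, pvReplace_toList, (pv_collapse_pvR s.toList).1]
    · rw [dif_neg h]
      apply (pv_collapse_of_not_infix _ _).symm
      intro hi
      apply h
      apply (PySem.Str.isIn_iff_infix "\n\n" s).mpr
      have h2 : ("\n\n" : String).toList = ['\n','\n'] := by decide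
      rwa [h2]

theorem pv_colF_some_ne (c : Char) (hc : c ≠ '\n') (l : List Char) :
    pvColF (some c) l = pvColF none l := by
  induction l with
  | nil => rfl
  | cons d t ih =>
    rw [pvColF, pvColF,
        if_neg (by rintro ⟨-, h⟩; exact hc (Option.some.inj h)),
        if_neg (by rintro ⟨-, h⟩; simp at h)]

theorem pv_colF_none (l : List Char) :
    pvColF none l = pvCollapse l ∧
      '\n' :: pvColF (some '\n') l = pvCollapse ('\n' :: l) := by
  generalize hm : l.length = m
  induction m using Nat.strong_induction_on generalizing l with
  | _ m ih =>
    cases l with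
    | nil => simp [pvColF, pvCollapse]
    | cons c t =>
      subst hm
      have iht := ih t.length (by simp) t rfl
      refine ⟨?_, ?_⟩
      · rw [pvColF, if_neg (by rintro ⟨-, h⟩; simp at h)]
        by_cases hc : c = '\n'
        · subst hc; exact iht.2
        · rw [pv_colF_some_ne c hc, iht.1,
              pvCollapse_cons_ne c t (fun h => hc h.1)]
      · by_cases hc : c = '\n'
        · subst hc
          rw [pvColF, if_pos ⟨rfl, rfl⟩, pvCollapse_nl_nl]
          exact iht.2
        · rw [pvColF, if_neg (by rintro ⟨h, -⟩; exact hc h),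
              pvCollapse_cons_ne '\n' (c :: t)
                (by rintro ⟨-, h⟩; simp at h; exact hc h),
              pvCollapse_cons_ne c t (fun h => hc h.1),
              pv_colF_some_ne c hc, iht.1]

theorem pv_foldl_colF (l : List Char) : ∀ (acc : List Char),
    l.foldl (fun buf c => if c == '\n' && !buf.isEmpty && (buf.getLast? == some '\n') then buf
                          else buf ++ [c]) acc
      = acc ++ pvColF acc.getLast? l := by
  induction l with
  | nil => intro acc; simp [pvColF]
  | cons c t ih =>
    intro acc
    rw [List.foldl_cons, pvColF]
    by_cases h : c = '\n' ∧ acc.getLast? = some '\n'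
    · have hne : ¬ acc.isEmpty := by
        cases acc with
        | nil => simp at h
        | cons a as => simp
      rw [if_pos (by simp [h.1, h.2, hne]), if_pos h, ih]
    · have : ¬ (c == '\n' && !acc.isEmpty && (acc.getLast? == some '\n')) = true := by
        intro hb
        simp only [Bool.and_eq_true, beq_iff_eq, Bool.not_eq_true'] at hb
        exact h ⟨hb.1.1, hb.2⟩
      rw [if_neg this, if_neg h, ih]
      simp

theorem pv_loop_eq_fold (raw : String) :
    pvLoopA raw = String.ofList (raw.toList.foldl
      (fun buf c => if c == '\n' && !buf.isEmpty && (buf.getLast? == some '\n') then buf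
                    else buf ++ [c]) []) := by
  apply String.toList_inj.mp
  rw [pv_loopA_toList, String.toList_ofList, pv_foldl_colF]
  simp only [List.nil_append, List.getLast?_nil]
  exact ((pv_colF_none _).1).symm

-- ===== VERDICT (by name: the statement is the Claim_ definition above) =====
theorem getStudentPromptAndOutputPerTest_spec : Claim_equal_getStudentPromptAndOutputPerTest := by
  intro output testNum _
  unfold Spec_getStudentPromptAndOutputPerTest
  unfold getStudentPromptAndOutputPerTest getStudentPromptAndOutputPerTest_alt
  dsimp only
  rw [pv_idx_match_eq output (testNum * 3) "<NO PROMPT FOUND>" "<NO PROMPT FOUND>" PySem.Str.strip,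
      pv_idx_match_eq output (testNum * 3 + 1) "<NO OUTPUT FOUND>" "<NO OUTPUT FOUND>" (fun s => s),
      pv_loop_eq_fold]
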